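-- pv_equiv track=rewrite | github.com/Vidit-Singla/Python-Practice-2 | Are_they_in_order.py | asc_ord
-- ===== SOURCE A (Python) =====
-- def asc_ord(t):
--     l = list(t)
--     lc = l.copy()
--     l1 = []
--     while len(lc)!=0:
--         m = min(lc)
--         l1.append(m)
--         lc.remove(m)
--     if l == l1:
--         return True
--     else:
--         return False
-- ===== SOURCE B (Python) =====
-- def asc_ord(t):
--     l = list(t)
--     return all(x <= y for x, y in zip(l, l[1:]))
-- ===== Notes on version B (the rewrite author's own statement) =====
-- stated objective: faster
-- what changed: Replaced selection-sort-then-compare with a single pass over adjacent pairs (zip with the tail).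
import Mathlib
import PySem

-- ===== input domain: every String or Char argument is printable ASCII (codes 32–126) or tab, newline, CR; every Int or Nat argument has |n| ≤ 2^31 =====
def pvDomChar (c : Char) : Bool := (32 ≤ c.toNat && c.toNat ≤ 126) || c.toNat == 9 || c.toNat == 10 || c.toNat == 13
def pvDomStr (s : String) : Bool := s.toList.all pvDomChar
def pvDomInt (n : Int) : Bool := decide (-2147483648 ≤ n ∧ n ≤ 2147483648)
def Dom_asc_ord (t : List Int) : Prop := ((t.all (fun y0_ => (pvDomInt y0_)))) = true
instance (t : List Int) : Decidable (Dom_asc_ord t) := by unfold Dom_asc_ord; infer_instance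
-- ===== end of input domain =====

-- B replaces A's selection-sort-then-compare by a single pass over adjacent pairs.

-- ===== PORT A =====
-- the while loop: take the minimum of lc, append it to l1, remove it from lc, until lc is empty
-- (fuel = initial length of lc; each iteration removes exactly one element)
def ascSelLoop (fuel : Nat) (lc l1 : List Int) : List Int :=
  match fuel with
  | 0 => l1
  | n + 1 =>
    if lc.length ≠ 0 then
      match PySem.List.min? lc (fun x => x) with
      | some m =>
        match PySem.List.remove? lc m with
        | some lc' => ascSelLoop n lc' (l1 ++ [m])
        | none => l1            -- unreachable: m ∈ lc
      | none => l1              -- unreachable: lc ≠ []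
    else l1

def asc_ord (t : List Int) : Bool :=
  let l := t
  let l1 := ascSelLoop l.length l []
  l == l1

-- ===== PORT B =====
-- all(x <= y for x, y in zip(l, l[1:]))
def asc_ord_alt (t : List Int) : Bool :=
  (t.zip (PySem.List.slice t (some 1) none)).all (fun p => p.1 ≤ p.2)

-- ===== PRECONDITION & SPEC =====
def Spec_asc_ord (t : List Int) (out : Bool) : Prop := out = asc_ord_alt t
instance (t : List Int) (out : Bool) : Decidable (Spec_asc_ord t out) := by unfold Spec_asc_ord; infer_instance

-- ===== CLAIM (what is proved, stated in full; the proofs are below) =====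
def Claim_equal_asc_ord : Prop := ∀ (t : List Int), Dom_asc_ord t → Spec_asc_ord t (asc_ord t)

-- ===== LEMMAS AND PROOFS =====

-- A's loop appends to the accumulator a sorted (pairwise ≤) permutation of lc
theorem ascSelLoop_sorted_perm :
    ∀ (n : Nat) (lc acc : List Int), lc.length = n →
      ∃ s, ascSelLoop n lc acc = acc ++ s ∧ lc.Perm s ∧ List.Pairwise (· ≤ ·) s := by
  intro n
  induction n with
  | zero =>
    intro lc acc h
    refine ⟨[], by simp [ascSelLoop], ?_, by simp⟩
    simp [List.length_eq_zero_iff.mp h]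
  | succ k ih =>
    intro lc acc h
    have hne : lc ≠ [] := by intro he; simp [he] at h
    obtain ⟨m, hm⟩ : ∃ m, PySem.List.min? lc (fun x => x) = some m := by
      cases hmin : PySem.List.min? lc (fun x : Int => x) with
      | none => exact absurd (((PySem.List.min?_eq_none_iff lc (fun x => x)).mp hmin)) hne
      | some m => exact ⟨m, rfl⟩
    have hmem : m ∈ lc := PySem.List.min?_mem hm
    have hmin : ∀ y ∈ lc, m ≤ y := by
      intro y hy; simpa using PySem.List.min?_isMin hm y hy
    have hrem : PySem.List.remove? lc m = some (lc.erase m) :=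
      PySem.List.remove?_eq_some_erase lc m hmem
    have hlen : (lc.erase m).length = k := by
      have := lc.length_erase_of_mem hmem; omega
    obtain ⟨s, hs, hperm, hsort⟩ := ih (lc.erase m) (acc ++ [m]) hlen
    refine ⟨m :: s, ?_, ?_, ?_⟩
    · simp only [ascSelLoop, if_pos (by omega : lc.length ≠ 0), hm, hrem, hs]
      simp
    · exact (lc.perm_cons_erase hmem).trans (hperm.cons m)
    · refine List.pairwise_cons.mpr ⟨?_, hsort⟩
      intro y hy
      exact hmin y (List.erase_subset (hperm.mem_iff.mpr hy))

-- B computes sortedness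
theorem alt_iff_pairwise : ∀ (t : List Int), asc_ord_alt t = true ↔ List.Pairwise (· ≤ ·) t := by
  intro t
  induction t with
  | nil => simp [asc_ord_alt]
  | cons a t ih =>
    cases t with
    | nil => simp [asc_ord_alt, PySem.List.slice_from_one]
    | cons b t' =>
      simp only [asc_ord_alt, PySem.List.slice_from_one, List.tail_cons] at ih ⊢
      simp only [List.zip_cons_cons, List.all_cons, Bool.and_eq_true, decide_eq_true_iff]
      rw [ih]
      constructor
      · rintro ⟨hab, hp⟩
        refine List.pairwise_cons.mpr ⟨?_, hp⟩
        intro y hy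
        rcases List.mem_cons.mp hy with rfl | hy
        · exact hab
        · exact hab.trans (List.rel_of_pairwise_cons hp hy)
      · intro hp
        exact ⟨List.rel_of_pairwise_cons hp (List.mem_cons_self ..), hp.of_cons⟩

-- ===== VERDICT (by name: the statement is the Claim_ definition above) =====
theorem asc_ord_spec : Claim_equal_asc_ord := by
  intro t _
  unfold Spec_asc_ord
  obtain ⟨s, hs, hperm, hsort⟩ := ascSelLoop_sorted_perm t.length t [] rfl
  simp only [asc_ord, hs, List.nil_append]
  by_cases h : List.Pairwise (· ≤ ·) t
  · have ht : t = s := List.Perm.eq_of_pairwise' h hsort hperm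
    have halt : asc_ord_alt t = true := (alt_iff_pairwise t).mpr h
    simp [← ht, halt]
  · have hne : t ≠ s := fun he => h (he ▸ hsort)
    have halt : asc_ord_alt t = false := by
      cases hb : asc_ord_alt t
      · rfl
      · exact absurd ((alt_iff_pairwise t).mp hb) h
    simp [halt, hne]
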